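-- pv_equiv track=rewrite | github.com/vadixon98/vadixon98 | analyze_loops.py | identify_loops
-- ===== SOURCE A (Python) =====
-- def identify_loops(structured_regions, atoms_by_residue):
--     """
--     Identify loop regions as residues that are not in helices or sheets.
--
--     Returns:
--         loops: list of lists, where each inner list contains (chain_id, resnum) tuples
--                representing a contiguous loop region
--     """
--     # Get all residues that have atoms
--     all_residues = sorted(set(atoms_by_residue.keys()))
--
--     # Identify loop residues (not in structured regions)
--     loop_residues = [res for res in all_residues if res not in structured_regions]
--
--     if not loop_residues:
--         return []
--
--     # Group contiguous loop residues
--     loops = []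
--     current_loop = [loop_residues[0]]
--
--     for i in range(1, len(loop_residues)):
--         prev_chain, prev_resnum = loop_residues[i-1]
--         curr_chain, curr_resnum = loop_residues[i]
--
--         # Check if residues are contiguous (same chain and consecutive)
--         if prev_chain == curr_chain and curr_resnum == prev_resnum + 1:
--             current_loop.append(loop_residues[i])
--         else:
--             # End of current loop, start new one
--             if current_loop:
--                 loops.append(current_loop)
--             current_loop = [loop_residues[i]]
--
--     # Add the last loop
--     if current_loop:
--         loops.append(current_loop)
--
--     return loops
-- ===== SOURCE B (Python) =====
-- def identify_loops(structured_regions, atoms_by_residue):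
--     """Membership-driven run detection: a loop residue starts a region iff its
--     predecessor (chain, resnum-1) is not a loop residue; each region is then
--     traced forward by successor lookups in a set, with no prev/current pair state."""
--     all_residues = sorted(set(atoms_by_residue.keys()))
--     loop_residues = [res for res in all_residues if res not in structured_regions]
--     loop_set = set(loop_residues)
--     loops = []
--     for chain, num in loop_residues:
--         if (chain, num - 1) not in loop_set:
--             run = []
--             k = num
--             while (chain, k) in loop_set:
--                 run.append((chain, k))
--                 k += 1
--             loops.append(run)
--     return loops
-- ===== Notes on version B (the rewrite author's own statement) =====
-- stated objective: alternative
-- what changed: A's index loop over adjacent pairs (prev/current with a mutable current_loop accumulator) is replaced by set-membership run detection: a residue starts a loop region iff (chain, resnum-1) is absent from the loop-residue set, and the region is traced forward by successor lookups (chain, k+1) in that set, never comparing neighbouring list positions.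
import Mathlib
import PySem

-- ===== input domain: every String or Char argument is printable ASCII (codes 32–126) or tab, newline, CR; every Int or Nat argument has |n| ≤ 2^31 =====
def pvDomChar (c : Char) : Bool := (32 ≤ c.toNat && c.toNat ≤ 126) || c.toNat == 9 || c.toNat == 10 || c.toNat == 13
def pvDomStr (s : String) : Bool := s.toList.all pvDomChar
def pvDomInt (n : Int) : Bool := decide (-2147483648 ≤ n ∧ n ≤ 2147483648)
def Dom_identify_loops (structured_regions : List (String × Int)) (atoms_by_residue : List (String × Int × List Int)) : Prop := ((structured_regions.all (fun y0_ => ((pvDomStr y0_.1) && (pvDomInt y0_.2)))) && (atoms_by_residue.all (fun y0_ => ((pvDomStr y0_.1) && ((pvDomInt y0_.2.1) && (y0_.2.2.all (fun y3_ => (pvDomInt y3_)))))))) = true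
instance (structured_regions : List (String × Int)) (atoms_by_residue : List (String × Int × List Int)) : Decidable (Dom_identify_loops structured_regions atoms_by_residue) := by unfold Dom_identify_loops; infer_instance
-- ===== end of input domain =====

-- B replaces A's adjacent-pair index loop by set-membership run detection (a residue
-- starts a loop iff its predecessor is absent; runs are traced by successor lookups):
-- a genuinely different algorithm of the same cost, no speed claim.

-- ===== PORT A =====
-- A's grouping loop: state (loops, current_loop), for i in range(1, len) with xs[i-1], xs[i]
def pvGroupA (loop_residues : List (String × Int)) : List (List (String × Int)) :=
  if loop_residues.isEmpty then []
  else
    let st := (PySem.List.pyRange 1 (PySem.List.len loop_residues) 1).foldl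
      (fun (st : List (List (String × Int)) × List (String × Int)) i =>
        let prev := PySem.List.pyGetD loop_residues (i - 1) ("", 0)
        let curr := PySem.List.pyGetD loop_residues i ("", 0)
        if prev.1 == curr.1 && curr.2 == prev.2 + 1 then
          (st.1, st.2 ++ [curr])
        else
          ((if st.2.isEmpty then st.1 else st.1 ++ [st.2]), [curr]))
      ([], [PySem.List.pyGetD loop_residues 0 ("", 0)])
    if st.2.isEmpty then st.1 else st.1 ++ [st.2]

def identify_loops (structured_regions : List (String × Int)) (atoms_by_residue : List (String × Int × List Int)) : List (List (String × Int)) :=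
  let all_residues :=
    PySem.List.sorted2 (PySem.Set.ofList (atoms_by_residue.map (fun x => (x.1, x.2.1))))
      (fun r => r.1) (fun r => r.2)
  let loop_residues := all_residues.filter (fun r => !(structured_regions.contains r))
  pvGroupA loop_residues

-- ===== PORT B =====
-- B's while loop 'while (chain, k) in loop_set: run.append((chain, k)); k += 1',
-- with fuel |loop_set| + 1: the run's members are distinct elements of loop_set,
-- so the condition fails before the fuel can run out.
def pvRun (s : List (String × Int)) (chain : String) (k : Int) : Nat → List (String × Int)
  | 0 => []
  | fuel + 1 =>
    if PySem.Set.contains s (chain, k) then (chain, k) :: pvRun s chain (k + 1) fuel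
    else []

def identify_loops_alt (structured_regions : List (String × Int)) (atoms_by_residue : List (String × Int × List Int)) : List (List (String × Int)) :=
  let all_residues :=
    PySem.List.sorted2 (PySem.Set.ofList (atoms_by_residue.map (fun x => (x.1, x.2.1))))
      (fun r => r.1) (fun r => r.2)
  let loop_residues := all_residues.filter (fun r => !(structured_regions.contains r))
  let loop_set : PySem.Set (String × Int) := PySem.Set.ofList loop_residues
  loop_residues.foldl
    (fun loops p =>
      if PySem.Set.contains loop_set (p.1, p.2 - 1) then loops
      else loops ++ [pvRun loop_set p.1 p.2 (loop_set.length + 1)])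
    []

-- ===== PRECONDITION & SPEC =====
def Spec_identify_loops (structured_regions : List (String × Int)) (atoms_by_residue : List (String × Int × List Int)) (out : List (List (String × Int))) : Prop := out = identify_loops_alt structured_regions atoms_by_residue
instance (structured_regions : List (String × Int)) (atoms_by_residue : List (String × Int × List Int)) (out : List (List (String × Int))) : Decidable (Spec_identify_loops structured_regions atoms_by_residue out) := by unfold Spec_identify_loops; infer_instance

-- ===== CLAIM (what is proved, stated in full; the proofs are below) =====
def Claim_equal_identify_loops : Prop := ∀ (structured_regions : List (String × Int)) (atoms_by_residue : List (String × Int × List Int)), Dom_identify_loops structured_regions atoms_by_residue → Spec_identify_loops structured_regions atoms_by_residue (identify_loops structured_regions atoms_by_residue)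

-- ===== LEMMAS AND PROOFS =====

-- the strict lexicographic order Python's tuple '<' induces on (chain, resnum)
def pvLt (a b : String × Int) : Prop := a.1 < b.1 ∨ (a.1 = b.1 ∧ a.2 < b.2)

theorem pvLt_trans {a b c : String × Int} (h1 : pvLt a b) (h2 : pvLt b c) : pvLt a c := by
  rcases h1 with h1 | ⟨h1, h1'⟩ <;> rcases h2 with h2 | ⟨h2, h2'⟩
  · exact Or.inl (lt_trans h1 h2)
  · exact Or.inl (h2 ▸ h1)
  · exact Or.inl (h1 ▸ h2)
  · exact Or.inr ⟨h1.trans h2, by omega⟩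

theorem pvLt_asymm {a b : String × Int} (h1 : pvLt a b) (h2 : pvLt b a) : False := by
  rcases h1 with h1 | ⟨h1, h1'⟩ <;> rcases h2 with h2 | ⟨h2, h2'⟩
  · exact absurd h2 (lt_asymm h1)
  · exact absurd h1 (h2 ▸ lt_irrefl _)
  · exact absurd h2 (h1 ▸ lt_irrefl _)
  · omega

theorem pvLt_total {a b : String × Int} (h : a ≠ b) : pvLt a b ∨ pvLt b a := by
  rcases lt_trichotomy a.1 b.1 with h1 | h1 | h1
  · exact Or.inl (Or.inl h1)
  · rcases lt_trichotomy a.2 b.2 with h2 | h2 | h2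
    · exact Or.inl (Or.inr ⟨h1, h2⟩)
    · exact absurd (Prod.ext h1 h2) h
    · exact Or.inr (Or.inr ⟨h1.symm, h2⟩)
  · exact Or.inr (Or.inl h1)

-- no third residue fits strictly between a residue and its successor
theorem pvLt_sandwich {p e w : String × Int} (h1 : pvLt p e) (h2 : pvLt e w)
    (hfst : p.1 = w.1) (hsnd : w.2 = p.2 + 1) : False := by
  rcases h1 with h1 | ⟨h1a, h1b⟩ <;> rcases h2 with h2 | ⟨h2a, h2b⟩
  · rw [← hfst] at h2
    exact lt_asymm h1 h2
  · rw [h2a, ← hfst] at h1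
    exact lt_irrefl _ h1
  · rw [← hfst] at h2
    rw [h1a] at h2
    exact lt_irrefl _ h2
  · omega

-- the comparison sorted2 uses, as a named boolean
def pvBefore (a b : String × Int) : Bool :=
  decide (a.1 < b.1) || (!decide (b.1 < a.1) && decide (a.2 < b.2))

theorem pvBefore_iff (a b : String × Int) : pvBefore a b = true ↔ pvLt a b := by
  unfold pvBefore pvLt
  simp only [Bool.or_eq_true, Bool.and_eq_true, Bool.not_eq_true', decide_eq_true_eq,
    decide_eq_false_iff_not]
  constructor
  · rintro (h | ⟨h1, h2⟩)
    · exact Or.inl h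
    · rcases lt_or_eq_of_le (not_lt.mp h1) with h | h
      · exact Or.inl h
      · exact Or.inr ⟨h, h2⟩
  · rintro (h | ⟨h1, h2⟩)
    · exact Or.inl h
    · exact Or.inr ⟨by rw [h1]; exact lt_irrefl _, h2⟩

theorem pv_sorted2_eq (l : List (String × Int)) :
    PySem.List.sorted2 l (fun r => r.1) (fun r => r.2)
      = l.foldl (fun acc x => PySem.List.insertBy pvBefore x acc) [] := rfl

theorem pv_insertBy_pairwise (x : String × Int) (l : List (String × Int))
    (h : l.Pairwise (fun a b => ¬ pvLt b a)) :
    (PySem.List.insertBy pvBefore x l).Pairwise (fun a b => ¬ pvLt b a) := by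
  induction l with
  | nil => simp [PySem.List.insertBy]
  | cons y ys ih =>
    rw [List.pairwise_cons] at h
    by_cases hb : pvBefore x y = true
    · have hlt : pvLt x y := (pvBefore_iff x y).mp hb
      simp only [PySem.List.insertBy, hb, if_true]
      refine List.Pairwise.cons ?_ (List.Pairwise.cons h.1 h.2)
      intro b hbmem hcon
      rcases List.mem_cons.mp hbmem with rfl | hbmem
      · exact pvLt_asymm hlt hcon
      · exact h.1 b hbmem (pvLt_trans hcon hlt)
    · simp only [PySem.List.insertBy, hb]
      refine List.Pairwise.cons ?_ (ih h.2)
      intro b hbmem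
      rcases (PySem.List.mem_insertBy pvBefore x b ys).mp hbmem with hb' | hb'
      · intro hcon
        rw [hb'] at hcon
        exact hb ((pvBefore_iff _ _).mpr hcon)
      · exact h.1 b hb'

theorem pv_foldl_insertBy_pairwise (l : List (String × Int)) :
    ∀ acc : List (String × Int), acc.Pairwise (fun a b => ¬ pvLt b a) →
    (l.foldl (fun acc x => PySem.List.insertBy pvBefore x acc) acc).Pairwise
      (fun a b => ¬ pvLt b a) := by
  induction l with
  | nil => intro acc h; simpa using h
  | cons x xs ih =>
    intro acc h
    exact ih _ (pv_insertBy_pairwise x acc h)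

theorem pv_pairwise_lt_of {l : List (String × Int)}
    (h1 : l.Pairwise (fun a b => ¬ pvLt b a)) (h2 : l.Nodup) : l.Pairwise pvLt := by
  refine (h1.and h2).imp ?_
  rintro a b ⟨hn, hne⟩
  exact (pvLt_total hne).resolve_right hn

-- proof-only state of A's loop
def pvSt : Type := List (List (String × Int)) × List (String × Int)

def pvStep (st : pvSt) (p c : String × Int) : pvSt :=
  if p.1 == c.1 && c.2 == p.2 + 1 then
    (st.1, st.2 ++ [c])
  else
    ((if st.2.isEmpty then st.1 else st.1 ++ [st.2]), [c])

def pvPairFold : (String × Int) → List (String × Int) → pvSt → pvSt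
  | _, [], st => st
  | x, c :: rest, st => pvPairFold c rest (pvStep st x c)

-- (run tail of the group containing x, the later groups) of x :: rest, by adjacency
def pvGrp2 : (String × Int) → List (String × Int) → List (String × Int) × List (List (String × Int))
  | _, [] => ([], [])
  | x, c :: rest =>
    let t := pvGrp2 c rest
    if x.1 == c.1 && c.2 == x.2 + 1 then (c :: t.1, t.2) else ([], (c :: t.1) :: t.2)

def pvGrpList : List (String × Int) → List (List (String × Int))
  | [] => []
  | c :: r => (c :: (pvGrp2 c r).1) :: (pvGrp2 c r).2

def pvFinish (st : pvSt) : List (List (String × Int)) :=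
  if st.2.isEmpty then st.1 else st.1 ++ [st.2]

theorem pv_idxfold_eq_pairFold (xs : List (String × Int)) :
    ∀ (m k : Nat) (x : String × Int) (st : pvSt) (_ : m = xs.length - k) (hk : k < xs.length), xs[k]'hk = x →
    (PySem.List.pyRange ((k : Int) + 1) (PySem.List.len xs) 1).foldl
      (fun st i => pvStep st (PySem.List.pyGetD xs (i - 1) ("", 0)) (PySem.List.pyGetD xs i ("", 0))) st
    = pvPairFold x (xs.drop (k + 1)) st := by
  intro m
  induction m with
  | zero => intro k x st hm hk hx; exact absurd hk (by omega)
  | succ n ih =>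
    intro k x st hm hk hx
    by_cases h2 : k + 1 < xs.length
    · have hcons : PySem.List.pyRange ((k : Int) + 1) (PySem.List.len xs) 1
          = ((k : Int) + 1) :: PySem.List.pyRange ((k : Int) + 1 + 1) (PySem.List.len xs) 1 := by
        apply PySem.List.pyRange_one_cons
        simp [PySem.List.len_eq]; omega
      rw [hcons]
      simp only [List.foldl_cons]
      have hprev : PySem.List.pyGetD xs ((k : Int) + 1 - 1) ("", 0) = x := by
        have : ((k : Int) + 1 - 1) = ((k : Nat) : Int) := by omega
        rw [this, PySem.List.pyGetD_natCast, List.getD_eq_getElem?_getD,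
          List.getElem?_eq_getElem hk, hx, Option.getD_some]
      have hcurr : PySem.List.pyGetD xs ((k : Int) + 1) ("", 0) = xs[k + 1]'h2 := by
        have : ((k : Int) + 1) = (((k + 1 : Nat)) : Int) := by omega
        rw [this, PySem.List.pyGetD_natCast, List.getD_eq_getElem?_getD,
          List.getElem?_eq_getElem h2, Option.getD_some]
      rw [hprev, hcurr]
      have hdrop : xs.drop (k + 1) = xs[k + 1]'h2 :: xs.drop (k + 2) :=
        List.drop_eq_getElem_cons h2
      rw [hdrop]
      show _ = pvPairFold (xs[k+1]'h2) (xs.drop (k + 1 + 1)) (pvStep st x (xs[k+1]'h2))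
      have : ((k : Int) + 1 + 1) = (((k + 1 : Nat)) : Int) + 1 := by omega
      rw [this]
      exact ih (k + 1) (xs[k+1]'h2) _ (by omega) h2 rfl
    · have hnil : PySem.List.pyRange ((k : Int) + 1) (PySem.List.len xs) 1 = [] := by
        apply PySem.List.pyRange_one_eq_nil
        simp [PySem.List.len_eq]; omega
      have hdrop : xs.drop (k + 1) = [] := List.drop_eq_nil_of_le (by omega)
      rw [hnil, hdrop]
      rfl

theorem pv_pairFold_grp2 :
    ∀ (rest : List (String × Int)) (x : String × Int) (loops : List (List (String × Int)))
      (cur : List (String × Int)), cur ≠ [] →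
    pvFinish (pvPairFold x rest (loops, cur))
      = loops ++ (cur ++ (pvGrp2 x rest).1) :: (pvGrp2 x rest).2 := by
  intro rest
  induction rest with
  | nil =>
    intro x loops cur hcur
    simp [pvPairFold, pvGrp2, pvFinish, hcur]
  | cons c rest ih =>
    intro x loops cur hcur
    simp only [pvPairFold, pvGrp2, pvStep]
    by_cases hadj : x.1 == c.1 && c.2 == x.2 + 1
    · rw [if_pos hadj, if_pos hadj]
      rw [ih c loops (cur ++ [c]) (by simp)]
      simp
    · rw [if_neg hadj, if_neg hadj]
      rw [ih c (if cur.isEmpty then loops else loops ++ [cur]) [c] (by simp)]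
      have : cur.isEmpty = false := by simpa using hcur
      simp [this]

theorem pv_grp2_drop :
    ∀ (rest : List (String × Int)) (x : String × Int),
    (pvGrp2 x rest).2 = pvGrpList (rest.drop (pvGrp2 x rest).1.length) := by
  intro rest
  induction rest with
  | nil => intro x; rfl
  | cons c rest ih =>
    intro x
    by_cases hadj : x.1 == c.1 && c.2 == x.2 + 1
    · simp only [pvGrp2, if_pos hadj, List.length_cons, List.drop_succ_cons]
      exact ih c
    · simp only [pvGrp2, if_neg hadj, List.length_nil, List.drop_zero, pvGrpList]

theorem pv_groupA_eq_grpList (xs : List (String × Int)) :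
    pvGroupA xs = pvGrpList xs := by
  match xs with
  | [] => rfl
  | x :: rest =>
    unfold pvGroupA
    simp only [List.isEmpty_cons, Bool.false_eq_true, if_false]
    have h0 : PySem.List.pyGetD (x :: rest) 0 ("", 0) = x := PySem.List.pyGetD_zero_cons x rest ("", 0)
    rw [h0]
    have hfold := pv_idxfold_eq_pairFold (x :: rest) ((x :: rest).length - 0) 0
        x (([], [x]) : pvSt) rfl (by simp) (by simp)
    have hfold' : ((PySem.List.pyRange 1 (PySem.List.len (x :: rest)) 1).foldl
        (fun st i => pvStep st (PySem.List.pyGetD (x :: rest) (i - 1) ("", 0))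
          (PySem.List.pyGetD (x :: rest) i ("", 0))) (([], [x]) : pvSt))
        = pvPairFold x rest ([], [x]) := by
      simpa using hfold
    show pvFinish ((PySem.List.pyRange 1 (PySem.List.len (x :: rest)) 1).foldl
        (fun st i => pvStep st (PySem.List.pyGetD (x :: rest) (i - 1) ("", 0))
          (PySem.List.pyGetD (x :: rest) i ("", 0))) (([], [x]) : pvSt))
        = pvGrpList (x :: rest)
    rw [hfold', pv_pairFold_grp2 rest x [] [x] (by simp)]
    simp [pvGrpList]

-- B-side lemmas -------------------------------------------------------------

-- the adjacency test, as an equation on pairs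
theorem pv_adj_iff (x c : String × Int) :
    (x.1 == c.1 && c.2 == x.2 + 1) = true ↔ c = (x.1, x.2 + 1) := by
  constructor
  · intro h
    simp only [Bool.and_eq_true, beq_iff_eq] at h
    exact Prod.ext h.1.symm h.2
  · intro h; subst h; simp

-- the run tail is an initial segment of the remaining list
theorem pv_grp1_prefix : ∀ (r : List (String × Int)) (z : String × Int),
    (pvGrp2 z r).1 <+: r := by
  intro r
  induction r with
  | nil => intro z; exact List.nil_prefix
  | cons c rest ih =>
    intro z
    by_cases hadj : z.1 == c.1 && c.2 == z.2 + 1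
    · simp only [pvGrp2, if_pos hadj]
      exact List.cons_prefix_cons.mpr ⟨rfl, ih c⟩
    · simp only [pvGrp2, if_neg hadj]
      exact List.nil_prefix

-- every member of a run tail has its predecessor inside the run
theorem pv_grp_chain : ∀ (r : List (String × Int)) (z : String × Int),
    ∀ c ∈ (pvGrp2 z r).1, (c.1, c.2 - 1) ∈ z :: (pvGrp2 z r).1 := by
  intro r
  induction r with
  | nil => intro z c hc; simp [pvGrp2] at hc
  | cons h rest ih =>
    intro z c hc
    by_cases hadj : z.1 == h.1 && h.2 == z.2 + 1
    · simp only [pvGrp2, if_pos hadj] at hc ⊢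
      have hh : h = (z.1, z.2 + 1) := (pv_adj_iff z h).mp hadj
      rcases List.mem_cons.mp hc with rfl | hc
      · refine List.mem_cons.mpr (Or.inl ?_)
        rw [hh]
        exact Prod.ext rfl (by simp)
      · have := ih h c hc
        rcases List.mem_cons.mp this with h1 | h1
        · exact List.mem_cons.mpr (Or.inr (List.mem_cons.mpr (Or.inl h1)))
        · exact List.mem_cons.mpr (Or.inr (List.mem_cons.mpr (Or.inr h1)))
    · simp only [pvGrp2, if_neg hadj] at hc
      simp at hc

-- when a run ends, the next element is not adjacent to the run's last element
theorem pv_grp_end : ∀ (r : List (String × Int)) (z w : String × Int),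
    (r.drop (pvGrp2 z r).1.length).head? = some w →
    ¬ (((pvGrp2 z r).1.getLastD z).1 = w.1 ∧ w.2 = ((pvGrp2 z r).1.getLastD z).2 + 1) := by
  intro r
  induction r with
  | nil => intro z w hw; simp [pvGrp2] at hw
  | cons h rest ih =>
    intro z w hw
    by_cases hadj : z.1 == h.1 && h.2 == z.2 + 1
    · simp only [pvGrp2, if_pos hadj, List.length_cons, List.drop_succ_cons,
        List.getLastD_cons] at hw ⊢
      exact ih h w hw
    · simp only [pvGrp2, if_neg hadj, List.length_nil, List.drop_zero,
        List.head?_cons, Option.some.injEq, List.getLastD_nil] at hw ⊢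
      rw [hw] at hadj
      intro hcon
      exact absurd ((pv_adj_iff z w).mpr (Prod.ext hcon.1.symm hcon.2))
        (by simpa using hadj)

-- adjacency in a strictly sorted list is set membership of the successor
theorem pv_adj_mem {xs : List (String × Int)} (hpw : xs.Pairwise pvLt)
    {z : String × Int} {r : List (String × Int)} (hsuf : (z :: r) <:+ xs) :
    (z.1, z.2 + 1) ∈ xs ↔ r.head? = some (z.1, z.2 + 1) := by
  obtain ⟨pre, hpre⟩ := hsuf
  constructor
  · intro hm
    rw [← hpre] at hm hpw
    rw [List.pairwise_append] at hpw
    rcases List.mem_append.mp hm with hm | hm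
    · exfalso
      have h1 : pvLt (z.1, z.2 + 1) z := hpw.2.2 _ hm z List.mem_cons_self
      have h2 : pvLt z (z.1, z.2 + 1) := Or.inr ⟨rfl, by omega⟩
      exact pvLt_asymm h1 h2
    · rcases List.mem_cons.mp hm with hm | hm
      · exfalso
        have : z.2 + 1 = z.2 := congrArg Prod.snd hm
        omega
      · match r, hm with
        | h :: rest, hm =>
          rcases List.mem_cons.mp hm with hm | hm
          · rw [List.head?_cons, hm]
          · exfalso
            have hzh : pvLt z h := (List.pairwise_cons.mp hpw.2.1).1 h List.mem_cons_self
            have hhm : pvLt h (z.1, z.2 + 1) :=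
              (List.pairwise_cons.mp (List.pairwise_cons.mp hpw.2.1).2).1 _ hm
            exact pvLt_sandwich hzh hhm rfl rfl
  · intro hh
    match r, hh with
    | h :: rest, hh =>
      have : h = (z.1, z.2 + 1) := by simpa using hh
      subst this
      exact hpre ▸ List.mem_append.mpr (Or.inr (List.mem_cons.mpr
        (Or.inr List.mem_cons_self)))

-- B's while loop produces exactly the adjacency run
theorem pv_run_eq {xs : List (String × Int)} (hpw : xs.Pairwise pvLt) :
    ∀ (r : List (String × Int)) (z : String × Int) (f : Nat),
    (z :: r) <:+ xs → r.length + 1 ≤ f →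
    pvRun xs z.1 z.2 f = z :: (pvGrp2 z r).1 := by
  intro r
  induction r with
  | nil =>
    intro z f hsuf hf
    match f, hf with
    | f' + 1, _ =>
      have hzm : z ∈ xs := hsuf.subset List.mem_cons_self
      have hnm : (z.1, z.2 + 1) ∉ xs := by
        intro hm
        have := (pv_adj_mem hpw hsuf).mp hm
        simp at this
      match f' with
      | 0 => simp [pvRun, hzm, pvGrp2]
      | f'' + 1 => simp [pvRun, hzm, hnm, pvGrp2]
  | cons h rest ih =>
    intro z f hsuf hf
    match f, hf with
    | f' + 1, hf2 =>
      have hzm : z ∈ xs := hsuf.subset List.mem_cons_self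
      have hz : PySem.Set.contains xs (z.1, z.2) = true :=
        (PySem.Set.contains_iff _ _).mpr (by simpa using hzm)
      have htl : (h :: rest) <:+ xs := (List.suffix_cons z _).trans hsuf
      by_cases hadj : z.1 == h.1 && h.2 == z.2 + 1
      · have hh : h = (z.1, z.2 + 1) := (pv_adj_iff z h).mp hadj
        simp only [pvRun, hz, if_true, pvGrp2, if_pos hadj]
        rw [show pvRun xs z.1 (z.2 + 1) f' = pvRun xs h.1 h.2 f' by rw [hh]]
        rw [ih h f' htl (by simp at hf2 ⊢; omega)]
      · have hnm : (z.1, z.2 + 1) ∉ xs := by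
          intro hm
          have := (pv_adj_mem hpw hsuf).mp hm
          simp only [List.head?_cons, Option.some.injEq] at this
          exact absurd ((pv_adj_iff z h).mpr this) (by simpa using hadj)
        simp only [pvGrp2, if_neg hadj]
        match f', hf2 with
        | f'' + 1, _ => simp [pvRun, hzm, hnm]

-- after a run ends, the next residue's predecessor is not a loop residue
theorem pv_start {xs : List (String × Int)} (hpw : xs.Pairwise pvLt)
    {z w : String × Int} {r : List (String × Int)} (hsuf : (z :: r) <:+ xs)
    (hw : (r.drop (pvGrp2 z r).1.length).head? = some w) :
    (w.1, w.2 - 1) ∉ xs := by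
  intro hp
  obtain ⟨pre, hpre⟩ := hsuf
  obtain ⟨t, ht⟩ := pv_grp1_prefix r z
  set g1 := (pvGrp2 z r).1 with hg1
  have hdrop : r.drop g1.length = t := by rw [← ht, List.drop_left]
  rw [hdrop] at hw
  cases t with
  | nil => simp at hw
  | cons w' rest'' =>
    have hww : w' = w := by simpa using hw
    subst hww
    -- xs = (pre ++ z :: g1) ++ w' :: rest''
    have hxs : xs = (pre ++ z :: g1) ++ w' :: rest'' := by
      rw [← hpre, ← ht]; simp
    set P := pre ++ z :: g1 with hP
    rw [hxs] at hpw hp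
    rw [List.pairwise_append] at hpw
    rcases List.mem_append.mp hp with hpm | hpm
    · -- predecessor among earlier residues
      set e := g1.getLastD z with he
      have hzg : (z :: g1) ≠ [] := by simp
      have hlast : (z :: g1).getLast hzg = e := by
        rw [he, List.getLast_eq_getLastD]
      have hsplit : z :: g1 = (z :: g1).dropLast ++ [e] := by
        rw [← hlast]
        exact (List.dropLast_append_getLast hzg).symm
      have hPsplit : P = (pre ++ (z :: g1).dropLast) ++ [e] := by
        rw [hP]
        conv_lhs => rw [hsplit]
        simp
      have hem : e ∈ P := by rw [hPsplit]; simp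
      have hew : pvLt e w' := hpw.2.2 e hem w' List.mem_cons_self
      rcases List.mem_append.mp (hPsplit ▸ hpm) with hpm' | hpm'
      · -- strictly before the last element e
        have hpe : pvLt (w'.1, w'.2 - 1) e := by
          have hPpw := hpw.1
          rw [hPsplit, List.pairwise_append] at hPpw
          exact hPpw.2.2 _ hpm' e List.mem_cons_self
        exact pvLt_sandwich hpe hew rfl (by omega)
      · -- the predecessor IS the last run element: adjacency, contradicting run end
        have hpe : (w'.1, w'.2 - 1) = e := by simpa using hpm'
        have hend := pv_grp_end r z w' (by rw [← hg1, hdrop]; exact hw)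
        rw [← hg1] at hend
        exact hend ⟨by rw [← he, ← hpe], by rw [← he, ← hpe]; omega⟩
    · rcases List.mem_cons.mp hpm with hpm | hpm
      · have : w'.2 - 1 = w'.2 := congrArg Prod.snd hpm
        omega
      · have h1 : pvLt w' (w'.1, w'.2 - 1) := (List.pairwise_cons.mp hpw.2.1).1 _ hpm
        exact pvLt_asymm h1 (Or.inr ⟨rfl, by omega⟩)

-- the head of the whole sorted list has no predecessor in it
theorem pv_head_min {xs : List (String × Int)} (hpw : xs.Pairwise pvLt)
    {z : String × Int} {t : List (String × Int)} (hxs : xs = z :: t) :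
    (z.1, z.2 - 1) ∉ xs := by
  intro hp
  rw [hxs] at hp hpw
  rcases List.mem_cons.mp hp with hp | hp
  · have : z.2 - 1 = z.2 := congrArg Prod.snd hp
    omega
  · exact pvLt_asymm ((List.pairwise_cons.mp hpw).1 _ hp) (Or.inr ⟨rfl, by omega⟩)

-- the head of the whole sorted list has no predecessor in it (head? form)
theorem pv_head_min' {xs : List (String × Int)} (hpw : xs.Pairwise pvLt)
    {z : String × Int} (hz : xs.head? = some z) : (z.1, z.2 - 1) ∉ xs := by
  match xs, hz with
  | a :: t, hz =>
    have ha : a = z := by simpa using hz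
    subst ha
    exact pv_head_min hpw rfl

-- a fold step that skips every element of the list
theorem pv_skip (cond : String × Int → Bool) (F : String × Int → List (String × Int)) :
    ∀ (g : List (String × Int)) (accl : List (List (String × Int))),
    (∀ y ∈ g, cond y = true) →
    g.foldl (fun loops p => if cond p then loops else loops ++ [F p]) accl = accl := by
  intro g
  induction g with
  | nil => intro accl _; rfl
  | cons y g ih =>
    intro accl h
    simp only [List.foldl_cons, h y List.mem_cons_self, if_true]
    exact ih accl (fun a ha => h a (List.mem_cons.mpr (Or.inr ha)))

-- the outer for-loop over any sorted suffix whose head starts a run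
theorem pv_outer {xs : List (String × Int)} (hpw : xs.Pairwise pvLt) :
    ∀ (n : Nat) (ys : List (String × Int)) (acc : List (List (String × Int))),
    ys.length ≤ n → ys <:+ xs →
    (∀ z, ys.head? = some z → (z.1, z.2 - 1) ∉ xs) →
    ys.foldl (fun loops p =>
      if PySem.Set.contains xs (p.1, p.2 - 1) then loops
      else loops ++ [pvRun xs p.1 p.2 (xs.length + 1)]) acc
    = acc ++ pvGrpList ys := by
  intro n
  induction n with
  | zero =>
    intro ys acc hlen _ _
    have hnil : ys = [] := List.eq_nil_of_length_eq_zero (by omega)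
    subst hnil
    simp [pvGrpList]
  | succ n ih =>
    intro ys acc hlen hsuf hhead
    match ys with
    | [] => simp [pvGrpList]
    | z :: r =>
      have hstart : (z.1, z.2 - 1) ∉ xs := hhead z rfl
      have hcst : PySem.Set.contains xs (z.1, z.2 - 1) = false := by
        rw [← Bool.not_eq_true, PySem.Set.contains_iff]
        exact hstart
      obtain ⟨t, ht⟩ := pv_grp1_prefix r z
      have hdrop : r.drop (pvGrp2 z r).1.length = t := by
        have h := List.drop_left (l₁ := (pvGrp2 z r).1) (l₂ := t)
        rwa [ht] at h
      have hrun : pvRun xs z.1 z.2 (xs.length + 1) = z :: (pvGrp2 z r).1 := by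
        apply pv_run_eq hpw r z _ hsuf
        have hle := hsuf.length_le
        simp only [List.length_cons] at hle
        omega
      have hsub : z :: (pvGrp2 z r).1 ⊆ xs := by
        intro a ha
        apply hsuf.subset
        rcases List.mem_cons.mp ha with rfl | ha
        · exact List.mem_cons_self
        · exact List.mem_cons.mpr (Or.inr ((pv_grp1_prefix r z).subset ha))
      have hskip : ∀ y ∈ (pvGrp2 z r).1, PySem.Set.contains xs (y.1, y.2 - 1) = true := by
        intro y hy
        rw [PySem.Set.contains_iff]
        exact hsub (pv_grp_chain r z y hy)
      have hglist : pvGrpList (z :: r) = (z :: (pvGrp2 z r).1) :: pvGrpList t := by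
        show (z :: (pvGrp2 z r).1) :: (pvGrp2 z r).2 = _
        rw [pv_grp2_drop, hdrop]
      have hfold : ∀ (acc' : List (List (String × Int))),
          List.foldl (fun loops p =>
            if PySem.Set.contains xs (p.1, p.2 - 1) then loops
            else loops ++ [pvRun xs p.1 p.2 (xs.length + 1)]) acc' r
          = List.foldl (fun loops p =>
            if PySem.Set.contains xs (p.1, p.2 - 1) then loops
            else loops ++ [pvRun xs p.1 p.2 (xs.length + 1)]) acc' t := by
        intro acc'
        conv_lhs => rw [← ht]
        rw [List.foldl_append,
          pv_skip (fun p => PySem.Set.contains xs (p.1, p.2 - 1))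
            (fun p => pvRun xs p.1 p.2 (xs.length + 1)) (pvGrp2 z r).1 _ hskip]
      rw [List.foldl_cons]
      simp only [hcst, Bool.false_eq_true, if_false, hrun]
      rw [hfold]
      have htsuf : t <:+ xs := by
        rw [← hdrop]
        exact ((List.drop_suffix _ r).trans ((List.suffix_cons z r).trans hsuf))
      have hthead : ∀ w, t.head? = some w → (w.1, w.2 - 1) ∉ xs := by
        intro w hw
        exact pv_start hpw hsuf (by rw [hdrop]; exact hw)
      have htlen : t.length ≤ n := by
        have hlen2 := congrArg List.length ht
        simp only [List.length_append] at hlen2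
        simp only [List.length_cons] at hlen
        omega
      rw [ih t _ htlen htsuf hthead, hglist]
      simp

-- A equals B on any strictly sorted duplicate-free residue list
theorem pv_final (xs : List (String × Int)) (hnd : xs.Nodup) (hpw : xs.Pairwise pvLt) :
    pvGroupA xs
      = xs.foldl (fun loops p =>
          if PySem.Set.contains (PySem.Set.ofList xs) (p.1, p.2 - 1) then loops
          else loops ++ [pvRun (PySem.Set.ofList xs) p.1 p.2 ((PySem.Set.ofList xs).length + 1)]) [] := by
  rw [PySem.Set.ofList_eq_self_of_nodup xs hnd, pv_groupA_eq_grpList,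
    pv_outer hpw xs.length xs [] le_rfl (List.suffix_refl xs)
      (fun z hz => pv_head_min' hpw hz)]
  simp

-- ===== VERDICT (by name: the statement is the Claim_ definition above) =====
theorem identify_loops_spec : Claim_equal_identify_loops := by
  intro sr abr _
  show identify_loops sr abr = identify_loops_alt sr abr
  have hperm := PySem.List.sorted2_perm
    (PySem.Set.ofList (abr.map (fun x => (x.1, x.2.1)))) (fun r => r.1) (fun r => r.2) false
  have hnd0 : (PySem.List.sorted2 (PySem.Set.ofList (abr.map (fun x => (x.1, x.2.1))))
      (fun r => r.1) (fun r => r.2)).Nodup :=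
    hperm.nodup_iff.mpr (PySem.Set.nodup_ofList _)
  have hpw0 : (PySem.List.sorted2 (PySem.Set.ofList (abr.map (fun x => (x.1, x.2.1))))
      (fun r => r.1) (fun r => r.2)).Pairwise (fun a b => ¬ pvLt b a) := by
    rw [pv_sorted2_eq]
    exact pv_foldl_insertBy_pairwise _ [] List.Pairwise.nil
  have hnd : ((PySem.List.sorted2 (PySem.Set.ofList (abr.map (fun x => (x.1, x.2.1))))
      (fun r => r.1) (fun r => r.2)).filter (fun r => !(sr.contains r))).Nodup :=
    hnd0.filter _
  have hpw : ((PySem.List.sorted2 (PySem.Set.ofList (abr.map (fun x => (x.1, x.2.1))))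
      (fun r => r.1) (fun r => r.2)).filter (fun r => !(sr.contains r))).Pairwise pvLt :=
    pv_pairwise_lt_of (hpw0.filter _) hnd
  exact pv_final _ hnd hpw
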